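-- pv_equiv track=rewrite | github.com/remyjeff/Lottery | probability.py | mode_filter
-- ===== SOURCE A (Python) =====
-- def getGroupFormat(p):
--     string = ""
--     for x in p:
--             string += (str(x // 10))
--     return string
--
-- def mode(lst):
--     max = 0
--     for a in lst:
--         b = lst.count(a)
--         if max < b:
--             max = b
--     return max
--
-- def mode_filter(lst):
--     gf = []
--     not_gf = []
--     for p in lst:
--         if mode(getGroupFormat(p)) < 3:
--             gf.append(p)
--         else:
--             not_gf.append(p)
--     return gf, not_gf
-- ===== SOURCE B (Python) =====
-- def getGroupFormat(p):
--     return "".join(str(x // 10) for x in p)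
--
-- def mode(lst):
--     best = 0
--     run = 0
--     prev = None
--     for a in sorted(lst):
--         if prev is not None and a == prev:
--             run += 1
--         else:
--             run = 1
--         prev = a
--         if run > best:
--             best = run
--     return best
--
-- def mode_filter(lst):
--     gf = []
--     not_gf = []
--     for p in lst:
--         if mode(getGroupFormat(p)) < 3:
--             gf.append(p)
--         else:
--             not_gf.append(p)
--     return gf, not_gf
-- ===== Notes on version B (the rewrite author's own statement) =====
-- stated objective: faster
-- what changed: mode no longer recomputes lst.count(a) for every element while tracking the max (a quadratic scan): B sorts the items and finds the longest run of equal consecutive items in a single pass (that run length equals the maximum frequency); getGroupFormat becomes a join over a generator.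
import Mathlib
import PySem

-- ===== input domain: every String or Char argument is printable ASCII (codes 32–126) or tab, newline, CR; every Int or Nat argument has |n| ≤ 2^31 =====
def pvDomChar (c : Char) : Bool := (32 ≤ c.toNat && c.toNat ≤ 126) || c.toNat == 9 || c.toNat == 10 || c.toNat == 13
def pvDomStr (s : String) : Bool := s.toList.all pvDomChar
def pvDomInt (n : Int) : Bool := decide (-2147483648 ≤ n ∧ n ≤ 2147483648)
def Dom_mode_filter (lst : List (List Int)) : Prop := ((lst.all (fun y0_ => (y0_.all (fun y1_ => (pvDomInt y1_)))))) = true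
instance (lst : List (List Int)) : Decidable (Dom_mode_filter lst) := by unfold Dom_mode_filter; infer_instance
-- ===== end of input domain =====

-- B replaces mode's quadratic count-scan by sort-then-longest-run: sort the items and
-- take the longest run of equal consecutive items (= the max frequency); measured faster on large inputs.


-- ===== PORT A =====
-- getGroupFormat: string concatenation of str(x // 10); modelled as its list of characters
-- (mode on a string iterates / counts its characters — exact on the list of chars).
def getGroupFormatA (p : List Int) : List Char :=
  p.foldl (fun s x => s ++ PySem.Int.toChars (PySem.Int.floordiv x 10)) []

-- mode: for each element, lst.count(a); keep the largest seen (0 initially).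
def modeA (lst : List Char) : Int :=
  lst.foldl (fun m a => if m < (lst.count a : Int) then (lst.count a : Int) else m) 0

def mode_filter (lst : List (List Int)) : List (List Int) × List (List Int) :=
  lst.foldl
    (fun (acc : List (List Int) × List (List Int)) p =>
      if modeA (getGroupFormatA p) < 3 then (acc.1 ++ [p], acc.2) else (acc.1, acc.2 ++ [p]))
    ([], [])

-- ===== PORT B =====
def getGroupFormatB (p : List Int) : List Char :=
  (p.map (fun x => PySem.Int.toChars (PySem.Int.floordiv x 10))).flatten

-- one loop step of B's run scan: state = (best, run, prev)
def stepB (st : Int × Int × Option Char) (a : Char) : Int × Int × Option Char :=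
  let run := if st.2.2 == some a then st.2.1 + 1 else 1
  let best := if run > st.1 then run else st.1
  (best, run, some a)

-- mode: sort the items, then the longest run of equal consecutive items.
def modeB (lst : List Char) : Int :=
  ((PySem.List.sorted lst (fun x => x) false).foldl stepB (0, 0, none)).1

def mode_filter_alt (lst : List (List Int)) : List (List Int) × List (List Int) :=
  lst.foldl
    (fun (acc : List (List Int) × List (List Int)) p =>
      if modeB (getGroupFormatB p) < 3 then (acc.1 ++ [p], acc.2) else (acc.1, acc.2 ++ [p]))
    ([], [])

-- ===== PRECONDITION & SPEC =====
def Spec_mode_filter (lst : List (List Int)) (out : List (List Int) × List (List Int)) : Prop := out = mode_filter_alt lst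
instance (lst : List (List Int)) (out : List (List Int) × List (List Int)) : Decidable (Spec_mode_filter lst out) := by unfold Spec_mode_filter; infer_instance

-- ===== CLAIM (what is proved, stated in full; the proofs are below) =====
def Claim_equal_mode_filter : Prop := ∀ (lst : List (List Int)), Dom_mode_filter lst → Spec_mode_filter lst (mode_filter lst)

-- ===== LEMMAS AND PROOFS =====

theorem getGroupFormat_eq (p : List Int) : getGroupFormatA p = getGroupFormatB p := by
  simp [getGroupFormatA, getGroupFormatB]

-- the "keep the largest" fold (shape of A's mode)
def fmax (m0 : Int) (xs : List Int) : Int :=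
  xs.foldl (fun m v => if m < v then v else m) m0

theorem fmax_cons (m x : Int) (t : List Int) : fmax m (x :: t) = fmax (max m x) t := by
  simp only [fmax, List.foldl_cons]
  congr 1
  omega

theorem fmax_eq_max (m n : Int) (xs : List Int) : fmax (max m n) xs = max m (fmax n xs) := by
  induction xs generalizing n with
  | nil => simp [fmax]
  | cons x t ih =>
    rw [fmax_cons, fmax_cons, max_assoc, ih]

theorem fmax_replicate (m x : Int) (k : Nat) :
    fmax m (List.replicate k x) = if k = 0 then m else max m x := by
  induction k generalizing m with
  | zero => simp [fmax]
  | succ k ih =>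
    rw [List.replicate_succ, fmax_cons, ih]
    rcases Nat.eq_zero_or_pos k with h | h
    · simp [h]
    · rw [if_neg (Nat.pos_iff_ne_zero.mp h), if_neg (Nat.succ_ne_zero k)]
      omega

theorem fmax_append (m : Int) (xs ys : List Int) :
    fmax m (xs ++ ys) = fmax (fmax m xs) ys := by
  simp [fmax, List.foldl_append]

theorem fmax_mem (m0 : Int) (xs : List Int) : fmax m0 xs ∈ m0 :: xs := by
  induction xs generalizing m0 with
  | nil => simp [fmax]
  | cons x xs ih =>
    simp only [fmax, List.foldl_cons] at *
    by_cases hc : m0 < x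
    · rw [if_pos hc]
      rcases List.mem_cons.mp (ih x) with h | h <;> simp [h]
    · rw [if_neg hc]
      rcases List.mem_cons.mp (ih m0) with h | h <;> simp [h]

theorem fmax_ub (m0 : Int) (xs : List Int) : ∀ y ∈ m0 :: xs, y ≤ fmax m0 xs := by
  induction xs generalizing m0 with
  | nil => simp [fmax]
  | cons x xs ih =>
    intro y hy
    simp only [fmax, List.foldl_cons] at *
    rcases List.mem_cons.mp hy with rfl | hy'
    · by_cases hc : y < x
      · have := ih x x (List.mem_cons_self ..); rw [if_pos hc]; omega
      · have := ih y y (List.mem_cons_self ..); rw [if_neg hc]; omega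
    · rcases List.mem_cons.mp hy' with rfl | hy''
      · by_cases hc : m0 < y
        · have := ih y y (List.mem_cons_self ..); rw [if_pos hc]; omega
        · have := ih m0 m0 (List.mem_cons_self ..); rw [if_neg hc]; omega
      · by_cases hc : m0 < x
        · have := ih x y (List.mem_cons_of_mem _ hy''); rw [if_pos hc]; omega
        · have := ih m0 y (List.mem_cons_of_mem _ hy''); rw [if_neg hc]; omega

theorem fmax_congr_mem (m0 : Int) (xs ys : List Int) (h : ∀ v, v ∈ xs ↔ v ∈ ys) :
    fmax m0 xs = fmax m0 ys := by
  have hx := fmax_mem m0 xs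
  have hy := fmax_mem m0 ys
  apply le_antisymm
  · apply fmax_ub
    rcases List.mem_cons.mp hx with hx | hx
    · rw [hx]; exact List.mem_cons_self ..
    · exact List.mem_cons_of_mem _ ((h _).mp hx)
  · apply fmax_ub
    rcases List.mem_cons.mp hy with hy | hy
    · rw [hy]; exact List.mem_cons_self ..
    · exact List.mem_cons_of_mem _ ((h _).mpr hy)

-- ===== run-scan lemmas (B's mode) =====

-- consuming j further copies of the current item extends the run by j
theorem run_replicate (c : Char) (j : Nat) : ∀ b r : Int, r ≤ b →
    (List.replicate j c).foldl stepB (b, r, some c) = (max b (r + j), r + j, some c) := by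
  induction j with
  | zero => intro b r h; simp [max_eq_left h]
  | succ j ih =>
    intro b r h
    rw [List.replicate_succ, List.foldl_cons]
    have hstep : stepB (b, r, some c) c = (max b (r + 1), r + 1, some c) := by
      simp only [stepB, beq_self_eq_true, if_true]
      congr 1
      omega
    rw [hstep, ih (max b (r + 1)) (r + 1) (le_max_right _ _)]
    refine Prod.ext ?_ (Prod.ext ?_ rfl) <;> push_cast <;> omega

-- a fresh item resets the run: the saved prev no longer matters
theorem run_reset (u : List Char) (b r : Int) (c : Char)
    (h : ∀ a, u.head? = some a → a ≠ c) :
    (u.foldl stepB (b, r, some c)).1 = (u.foldl stepB (b, 0, none)).1 := by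
  cases u with
  | nil => rfl
  | cons a t =>
    have ha : a ≠ c := h a rfl
    have : stepB (b, r, some c) a = stepB (b, 0, none) a := by
      simp only [stepB]
      have : (some c == some a) = false := by
        simp [beq_eq_false_iff_ne]
        exact fun hh => ha hh.symm
      simp [this]
    rw [List.foldl_cons, List.foldl_cons, this]

-- the best accumulator is a running max: it factors out
theorem run_best_shift (u : List Char) : ∀ (b r : Int) (p : Option Char), 0 ≤ b → 0 ≤ r →
    (u.foldl stepB (b, r, p)).1 = max b ((u.foldl stepB (0, r, p)).1) := by
  induction u with
  | nil => intro b r p hb hr; simp; omega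
  | cons a t ih =>
    intro b r p hb hr
    cases hpa : (p == some a) with
    | true =>
      simp only [List.foldl_cons, stepB, hpa, if_true]
      rw [show (if r + 1 > b then r + 1 else b) = max b (r + 1) from by omega,
          show (if r + 1 > (0:Int) then r + 1 else 0) = r + 1 from by omega]
      rw [ih (max b (r + 1)) (r + 1) (some a) (by omega) (by omega),
          ih (r + 1) (r + 1) (some a) (by omega) (by omega)]
      omega
    | false =>
      simp only [List.foldl_cons, stepB, hpa, Bool.false_eq_true, if_false]
      rw [show (if (1:Int) > b then 1 else b) = max b 1 from by omega,
          show (if (1:Int) > (0:Int) then 1 else 0) = (1:Int) from by norm_num]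
      rw [ih (max b 1) 1 (some a) (by omega) (by omega),
          ih 1 1 (some a) (by omega) (by omega)]
      omega

-- the main invariant: on a sorted list, the longest run equals the max count
theorem runMax (s : List Char) (hs : s.Pairwise (· ≤ ·)) :
    (s.foldl stepB (0, 0, none)).1 = fmax 0 (s.map (fun a => (s.count a : Int))) := by
  induction hn : s.length using Nat.strong_induction_on generalizing s with
  | _ n ih =>
  cases s with
  | nil => simp [fmax]
  | cons c t =>
    set s := c :: t with hsdef
    set tw := s.takeWhile (fun a => a == c) with htw
    set u := s.dropWhile (fun a => a == c) with hu
    have hsplit : tw ++ u = s := List.takeWhile_append_dropWhile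
    have htwc : ∀ x ∈ tw, x = c := by
      intro x hx
      have := List.mem_takeWhile_imp hx
      exact eq_of_beq this
    have htw_repl : tw = List.replicate tw.length c := by
      apply List.eq_replicate_of_mem htwc
    have htw_ne : tw.length ≠ 0 := by
      rw [htw, hsdef]
      simp [List.takeWhile]
    -- every element of u differs from c
    have hu_pair : u.Pairwise (· ≤ ·) := List.Pairwise.sublist (List.dropWhile_sublist _) hs
    have hu_ne : ∀ x ∈ u, x ≠ c := by
      intro x hx hxc
      cases hud : u with
      | nil => rw [hud] at hx; simp at hx
      | cons d v =>
        have hdc : d ≠ c := by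
          have := List.head?_dropWhile_not (fun a => a == c) s
          rw [← hu, hud] at this
          simp at this
          exact this
        have hdx : d ≤ x := by
          rw [hud] at hx
          rcases List.mem_cons.mp hx with rfl | hx'
          · exact le_refl _
          · rw [hud] at hu_pair
            exact (List.pairwise_cons.mp hu_pair).1 x hx'
        have hcd : c ≤ d := by
          have hd_mem : d ∈ s := by
            have : d ∈ u := by rw [hud]; exact List.mem_cons_self ..
            exact (List.dropWhile_sublist _).mem this
          rw [hsdef] at hd_mem
          rcases List.mem_cons.mp hd_mem with rfl | hd'
          · exact le_refl _
          · exact (List.pairwise_cons.mp (hsdef ▸ hs)).1 d hd'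
        exact hdc (le_antisymm (hxc ▸ hdx) hcd)
    have hcount_c : s.count c = tw.length := by
      rw [← hsplit, List.count_append]
      have h1 : tw.count c = tw.length := by
        rw [htw_repl]; simp
      have h2 : u.count c = 0 := by
        rw [List.count_eq_zero]
        intro hc
        exact hu_ne c hc rfl
      omega
    have hcount_u : ∀ x ∈ u, s.count x = u.count x := by
      intro x hx
      rw [← hsplit, List.count_append]
      have : tw.count x = 0 := by
        rw [List.count_eq_zero]
        intro hxtw
        exact hu_ne x hx (htwc x hxtw)
      omega
    have hlen : tw.length + u.length = n := by
      rw [← hn, ← hsplit]; simp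
    have hulen : u.length < n := by omega
    -- LHS: fold through the leading block, then the rest
    have hlhs : (s.foldl stepB (0, 0, none)).1
        = max (tw.length : Int) ((u.foldl stepB (0, 0, none)).1) := by
      rw [← hsplit, List.foldl_append]
      have hblock : tw.foldl stepB (0, 0, none)
          = ((tw.length : Int), (tw.length : Int), some c) := by
        obtain ⟨k, hk⟩ : ∃ k, tw.length = k + 1 :=
          Nat.exists_eq_succ_of_ne_zero htw_ne
        have hrw : tw.foldl stepB (0, 0, none)
            = (List.replicate (k + 1) c).foldl stepB (0, 0, none) := by
          rw [← hk, ← htw_repl]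
        have hstep : stepB ((0:Int), (0:Int), (none : Option Char)) c = (1, 1, some c) := by
          simp [stepB]
        rw [hrw, List.replicate_succ, List.foldl_cons, hstep,
          run_replicate c k 1 1 (le_refl _), hk]
        simp only [Prod.mk.injEq]
        refine ⟨by omega, by omega, trivial⟩
      rw [hblock]
      have hreset := run_reset u (tw.length : Int) (tw.length : Int) c
        (by intro a ha hac
            apply hu_ne a _ hac
            exact List.mem_of_mem_head? ha)
      rw [hreset]
      exact run_best_shift u (tw.length : Int) 0 none (by positivity) (le_refl _)
    -- RHS: split the map over the same decomposition
    have hrhs : fmax 0 (s.map (fun a => (s.count a : Int)))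
        = max (tw.length : Int) (fmax 0 (u.map (fun a => (u.count a : Int)))) := by
      conv_lhs => rw [← hsplit]
      rw [List.map_append, fmax_append]
      simp only [hsplit]
      have hmap_tw : tw.map (fun a => (s.count a : Int))
          = List.replicate tw.length ((tw.length : Nat) : Int) := by
        rw [List.map_eq_replicate_iff.mpr]
        intro x hx
        rw [htwc x hx, hcount_c]
      have hmap_u : u.map (fun a => (s.count a : Int)) = u.map (fun a => (u.count a : Int)) := by
        apply List.map_congr_left
        intro x hx
        rw [hcount_u x hx]
      rw [hmap_tw, hmap_u, fmax_replicate]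
      rw [if_neg (by exact_mod_cast htw_ne)]
      have : max (0:Int) (tw.length : Int) = (tw.length : Int) := by omega
      rw [this, ← fmax_eq_max ((tw.length : Int)) 0]
      congr 1
      omega
    rw [hlhs, hrhs, ih u.length hulen u hu_pair rfl]

theorem mode_eq (lst : List Char) : modeA lst = modeB lst := by
  have hA : modeA lst = fmax 0 (lst.map (fun a => (lst.count a : Int))) := by
    simp [modeA, fmax, List.foldl_map]
  set s := PySem.List.sorted lst (fun x => x) false with hsd
  have hperm : s.Perm lst := PySem.List.sorted_perm ..
  have hpair : s.Pairwise (· ≤ ·) := PySem.List.sorted_pairwise ..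
  have hB : modeB lst = fmax 0 (s.map (fun a => (s.count a : Int))) := runMax s hpair
  rw [hA, hB]
  apply fmax_congr_mem
  intro v
  simp only [List.mem_map]
  constructor
  · rintro ⟨a, ha, rfl⟩
    exact ⟨a, hperm.mem_iff.mpr ha, by rw [hperm.count_eq]⟩
  · rintro ⟨a, ha, rfl⟩
    exact ⟨a, hperm.mem_iff.mp ha, by rw [hperm.count_eq]⟩

-- ===== VERDICT (by name: the statement is the Claim_ definition above) =====
theorem mode_filter_spec : Claim_equal_mode_filter := by
  intro lst _
  show mode_filter lst = mode_filter_alt lst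
  unfold mode_filter mode_filter_alt
  congr 1
  funext acc p
  rw [getGroupFormat_eq, mode_eq]
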